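-- pv_equiv track=rewrite | github.com/ATZakir/Google-FooBar | challenges/rusty_calculator.py | answer
-- ===== SOURCE A (Python) =====
-- def answer(string):
--
-- 	string = list(string)
--
-- 	asterisk_count = 0
-- 	index = 0
--
-- 	while index < len(string):
-- 		if string[index] == "*":
-- 			string.pop(index)
-- 			asterisk_count+=1
-- 		elif string[index] == '+' and asterisk_count > 0:
-- 			for replace in range(asterisk_count):
-- 				string.insert(index,'*')
-- 			index+=asterisk_count
-- 			asterisk_count = 0
-- 		else:
-- 			index+=1
--
-- 	if asterisk_count > 0:
-- 		for replace in range(asterisk_count):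
-- 			string.insert(index,'*')
--
--
-- 	plus_count = 0
-- 	index2 = 0
--
-- 	while index2 < len(string):
-- 		if string[index2] == '+':
-- 			string.pop(index2)
-- 			plus_count+=1
-- 		else:
-- 			index2+=1
--
-- 	if plus_count > 0:
-- 		for replace in range(plus_count):
-- 			string.insert(index2,'+')
--
--
-- 	return ''.join(string)
-- ===== SOURCE B (Python) =====
-- def answer(string):
--     out = []
--     stars = 0
--     pluses = 0
--     for ch in string:
--         if ch == '*':
--             stars += 1
--         elif ch == '+':
--             out.append('*' * stars)
--             stars = 0
--             pluses += 1
--         else: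
--             out.append(ch)
--     return ''.join(out) + '*' * stars + '+' * pluses
-- ===== Notes on version B (the rewrite author's own statement) =====
-- stated objective: faster
-- what changed: Replaced A's two quadratic in-place while-loops (pop each '*'/'+' then re-insert runs with list.insert) by a single left-to-right pass that keeps a pending-asterisk counter and a plus counter and builds the output once.
import Mathlib
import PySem

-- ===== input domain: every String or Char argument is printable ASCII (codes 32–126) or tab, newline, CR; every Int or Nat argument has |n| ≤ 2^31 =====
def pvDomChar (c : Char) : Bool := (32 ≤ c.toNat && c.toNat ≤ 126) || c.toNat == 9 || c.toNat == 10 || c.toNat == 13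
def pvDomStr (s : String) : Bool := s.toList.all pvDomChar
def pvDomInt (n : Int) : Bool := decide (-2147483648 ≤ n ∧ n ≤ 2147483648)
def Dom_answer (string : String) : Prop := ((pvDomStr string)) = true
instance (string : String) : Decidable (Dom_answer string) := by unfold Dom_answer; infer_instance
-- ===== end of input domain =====

-- B replaces A's quadratic in-place pop/insert rearrangement by a single pass with
-- pending-star and plus counters (objective: faster).

-- ===== PORT A =====
-- Python list.insert at index idx (idx ≥ 0) clamps to the end when idx > len;
-- `take`/`drop` clamp the same way, so this is exact for nonneg indices (the loops' indices never go negative).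
def insClamp (l : List Char) (idx : Nat) (c : Char) : List Char :=
  l.take idx ++ c :: l.drop idx

-- `for replace in range(n): string.insert(index, c)`
def insertN (l : List Char) (idx : Nat) (n : Nat) (c : Char) : List Char :=
  match n with
  | 0 => l
  | n + 1 => insertN (insClamp l idx c) idx n c

theorem insClamp_length (l : List Char) (idx : Nat) (c : Char) :
    (insClamp l idx c).length = l.length + 1 := by
  simp [insClamp]

theorem insertN_length (l : List Char) (idx n : Nat) (c : Char) :
    (insertN l idx n c).length = l.length + n := by
  induction n generalizing l with
  | zero => simp [insertN]
  | succ n ih => simp [insertN, ih, insClamp_length]; omega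


-- first while loop of A (pop '*'s, reinsert them before the next '+')
def loop1 (s : List Char) (idx a : Nat) : List Char × Nat × Nat :=
  if h : idx < s.length then
    if s[idx] = '*' then loop1 (s.eraseIdx idx) idx (a + 1)
    else if s[idx] = '+' ∧ 0 < a then loop1 (insertN s idx a '*') (idx + a) 0
    else loop1 s (idx + 1) a
  else (s, idx, a)
termination_by (s.length - idx, a)
decreasing_by
  · simp [List.length_eraseIdx, h]; omega
  · simp [insertN_length]; omega
  · omega

-- second while loop of A (pop '+'s)
def loop2 (s : List Char) (idx p : Nat) : List Char × Nat × Nat :=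
  if h : idx < s.length then
    if s[idx] = '+' then loop2 (s.eraseIdx idx) idx (p + 1)
    else loop2 s (idx + 1) p
  else (s, idx, p)
termination_by (s.length - idx)
decreasing_by
  · simp [List.length_eraseIdx, h]; omega
  · omega

def answer (string : String) : String :=
  let r1 := loop1 string.toList 0 0
  let l1 := if 0 < r1.2.2 then insertN r1.1 r1.2.1 r1.2.2 '*' else r1.1
  let r2 := loop2 l1 0 0
  let l2 := if 0 < r2.2.2 then insertN r2.1 r2.2.1 r2.2.2 '+' else r2.1
  String.mk l2

-- ===== PORT B =====
-- single pass: out-list, pending-star counter, plus counter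
def stepB (acc : List Char × Nat × Nat) (ch : Char) : List Char × Nat × Nat :=
  if ch = '*' then (acc.1, acc.2.1 + 1, acc.2.2)
  else if ch = '+' then (acc.1 ++ List.replicate acc.2.1 '*', 0, acc.2.2 + 1)
  else (acc.1 ++ [ch], acc.2.1, acc.2.2)

def answer_alt (string : String) : String :=
  let st := string.toList.foldl stepB ([], 0, 0)
  String.mk (st.1 ++ List.replicate st.2.1 '*' ++ List.replicate st.2.2 '+')

-- ===== PRECONDITION & SPEC =====
def Spec_answer (string : String) (out : String) : Prop := out = answer_alt string
instance (string : String) (out : String) : Decidable (Spec_answer string out) := by unfold Spec_answer; infer_instance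

-- ===== CLAIM (what is proved, stated in full; the proofs are below) =====
def Claim_equal_answer : Prop := ∀ (string : String), Dom_answer string → Spec_answer string (answer string)

-- ===== LEMMAS AND PROOFS =====

-- abstract versions of the two loops
def phi : List Char → Nat → List Char × Nat
  | [], a => ([], a)
  | c :: t, a =>
    if c = '*' then phi t (a + 1)
    else if c = '+' ∧ 0 < a then
      let r := phi t 0; (List.replicate a '*' ++ '+' :: r.1, r.2)
    else
      let r := phi t a; (c :: r.1, r.2)

def psi : List Char → Nat → List Char × Nat
  | [], p => ([], p)
  | c :: t, p =>
    if c = '+' then psi t (p + 1)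
    else let r := psi t p; (c :: r.1, r.2)

-- combined behaviour (= B's output shape)
def bc : List Char → Nat → Nat → List Char
  | [], a, p => List.replicate a '*' ++ List.replicate p '+'
  | c :: t, a, p =>
    if c = '*' then bc t (a + 1) p
    else if c = '+' then List.replicate a '*' ++ bc t 0 (p + 1)
    else c :: bc t a p

theorem insertN_append (pre suf : List Char) (n : Nat) (c : Char) :
    insertN (pre ++ suf) pre.length n c = pre ++ List.replicate n c ++ suf := by
  induction n generalizing suf with
  | zero => simp [insertN]
  | succ n ih =>
    have h : insClamp (pre ++ suf) pre.length c = pre ++ c :: suf := by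
      simp [insClamp]
    rw [insertN, h, ih (c :: suf)]
    simp [List.replicate_succ']

theorem eraseIdx_append (pre : List Char) (c : Char) (t : List Char) :
    (pre ++ c :: t).eraseIdx pre.length = pre ++ t := by
  induction pre with
  | nil => simp
  | cons x xs ih => simp [ih]

theorem getElem_append_mid (pre : List Char) (c : Char) (t : List Char)
    (h : pre.length < (pre ++ c :: t).length) : (pre ++ c :: t)[pre.length] = c := by
  rw [List.getElem_append_right (le_refl pre.length)]
  simp

theorem loop1_eq (l : List Char) : ∀ (pre : List Char) (a : Nat),
    loop1 (pre ++ l) pre.length a =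
      (pre ++ (phi l a).1, pre.length + (phi l a).1.length, (phi l a).2) := by
  induction l with
  | nil => intro pre a; rw [loop1]; simp [phi]
  | cons c t ih =>
    intro pre a
    have hlen : pre.length < (pre ++ c :: t).length := by simp
    have hget := getElem_append_mid pre c t hlen
    rw [loop1]
    simp only [dif_pos hlen, hget]
    by_cases hs : c = '*'
    · subst hs
      simp only [eraseIdx_append, ih pre (a + 1), phi]
      simp
    · rw [if_neg hs]
      by_cases hp : c = '+' ∧ 0 < a
      · rw [if_pos hp]
        obtain ⟨hc, ha⟩ := hp
        subst hc
        rw [insertN_append pre ('+' :: t) a '*']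
        have hlen2 : pre.length + a = (pre ++ List.replicate a '*').length := by simp
        rw [show pre ++ List.replicate a '*' ++ '+' :: t
              = (pre ++ List.replicate a '*') ++ '+' :: t by simp, hlen2]
        -- unfold the loop once more: now asterisk_count = 0, so it steps past the '+'
        have hlen3 : (pre ++ List.replicate a '*').length
            < ((pre ++ List.replicate a '*') ++ '+' :: t).length := by simp
        rw [loop1]
        simp only [dif_pos hlen3, getElem_append_mid _ '+' t hlen3]
        rw [if_neg (by decide : ¬ ('+' : Char) = '*'),
            if_neg (by simp : ¬ (True ∧ 0 < 0))]
        rw [show ((pre ++ List.replicate a '*') ++ '+' :: t)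
              = ((pre ++ List.replicate a '*' ++ ['+']) ++ t) by simp]
        rw [show (pre ++ List.replicate a '*').length + 1
              = (pre ++ List.replicate a '*' ++ ['+']).length by simp; omega]
        rw [ih (pre ++ List.replicate a '*' ++ ['+']) 0]
        have hphi : phi ('+' :: t) a
            = (List.replicate a '*' ++ '+' :: (phi t 0).1, (phi t 0).2) := by
          simp [phi, ha]
        rw [hphi]
        simp; omega
      · rw [if_neg hp]
        rw [show pre ++ c :: t = (pre ++ [c]) ++ t by simp,
            show pre.length + 1 = (pre ++ [c]).length by simp]
        rw [ih (pre ++ [c]) a]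
        simp only [phi, if_neg hs, if_neg hp]
        simp; omega

theorem loop2_eq (l : List Char) : ∀ (pre : List Char) (p : Nat),
    loop2 (pre ++ l) pre.length p =
      (pre ++ (psi l p).1, pre.length + (psi l p).1.length, (psi l p).2) := by
  induction l with
  | nil => intro pre p; rw [loop2]; simp [psi]
  | cons c t ih =>
    intro pre p
    have hlen : pre.length < (pre ++ c :: t).length := by simp
    rw [loop2]
    simp only [dif_pos hlen, getElem_append_mid pre c t hlen]
    by_cases hc : c = '+'
    · subst hc
      simp only [eraseIdx_append, ih pre (p + 1), psi]
      simp
    · rw [if_neg hc]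
      rw [show pre ++ c :: t = (pre ++ [c]) ++ t by simp,
          show pre.length + 1 = (pre ++ [c]).length by simp]
      rw [ih (pre ++ [c]) p]
      simp only [psi, if_neg hc]
      simp; omega

theorem psi_replicate_star (n : Nat) (l : List Char) (p : Nat) :
    psi (List.replicate n '*' ++ l) p =
      (List.replicate n '*' ++ (psi l p).1, (psi l p).2) := by
  induction n with
  | zero => simp
  | succ n ih => simp [List.replicate_succ, psi, ih]

-- the combined abstract loops compute bc
theorem phi_psi_bc (l : List Char) : ∀ (a p : Nat),
    (psi ((phi l a).1 ++ List.replicate (phi l a).2 '*') p).1 ++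
      List.replicate (psi ((phi l a).1 ++ List.replicate (phi l a).2 '*') p).2 '+'
    = bc l a p := by
  induction l with
  | nil =>
    intro a p
    simp only [phi, bc, List.nil_append]
    rw [show List.replicate a '*' = List.replicate a '*' ++ ([] : List Char) by simp,
        psi_replicate_star]
    simp [psi]
  | cons c t ih =>
    intro a p
    by_cases hs : c = '*'
    · subst hs
      simp only [phi, bc]
      exact ih (a + 1) p
    · by_cases hc : c = '+'
      · subst hc
        by_cases ha : 0 < a
        · have hphi : phi ('+' :: t) a
              = (List.replicate a '*' ++ '+' :: (phi t 0).1, (phi t 0).2) := by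
            simp [phi, ha]
          have hbc : bc ('+' :: t) a p = List.replicate a '*' ++ bc t 0 (p + 1) := by
            simp [bc]
          rw [hphi, hbc]
          simp only
          rw [List.append_assoc, psi_replicate_star]
          simp only [List.cons_append, psi, reduceIte]
          rw [List.append_assoc]
          exact congrArg (List.replicate a '*' ++ ·) (ih 0 (p + 1))
        · have ha0 : a = 0 := by omega
          subst ha0
          have hphi : phi ('+' :: t) 0 = ('+' :: (phi t 0).1, (phi t 0).2) := by
            simp [phi]
          have hbc : bc ('+' :: t) 0 p = bc t 0 (p + 1) := by simp [bc]
          rw [hphi, hbc]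
          simp only [List.cons_append, psi, reduceIte]
          exact ih 0 (p + 1)
      · have hphi : phi (c :: t) a = (c :: (phi t a).1, (phi t a).2) := by
          simp [phi, hs, hc]
        have hbc : bc (c :: t) a p = c :: bc t a p := by simp [bc, hs, hc]
        rw [hphi, hbc]
        simp only [List.cons_append, psi, if_neg hc]
        exact congrArg (c :: ·) (ih a p)

-- A computes bc
theorem answer_eq_bc (s : String) : answer s = String.mk (bc s.toList 0 0) := by
  unfold answer
  have h1 := loop1_eq s.toList [] 0
  simp only [List.nil_append, List.length_nil] at h1
  rw [h1]
  have hins1 : ∀ (l : List Char) (a : Nat),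
      (if 0 < a then insertN l l.length a '*' else l) = l ++ List.replicate a '*' := by
    intro l a
    by_cases ha : 0 < a
    · rw [if_pos ha]
      have := insertN_append l [] a '*'
      simpa using this
    · rw [if_neg ha]; have : a = 0 := (by omega); simp [this]
  simp only [Nat.zero_add]
  rw [show (phi s.toList 0).1.length = (phi s.toList 0).1.length from rfl]
  rw [hins1]
  have h2 := loop2_eq ((phi s.toList 0).1 ++ List.replicate (phi s.toList 0).2 '*') [] 0
  simp only [List.nil_append, List.length_nil, Nat.zero_add] at h2
  rw [h2]
  have hins2 : ∀ (l : List Char) (p : Nat),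
      (if 0 < p then insertN l l.length p '+' else l) = l ++ List.replicate p '+' := by
    intro l p
    by_cases hp : 0 < p
    · rw [if_pos hp]
      have := insertN_append l [] p '+'
      simpa using this
    · rw [if_neg hp]; have : p = 0 := (by omega); simp [this]
  rw [hins2]
  rw [phi_psi_bc s.toList 0 0]

-- B's fold computes bc
theorem foldl_bc (l : List Char) : ∀ (out : List Char) (a p : Nat),
    (l.foldl stepB (out, a, p)).1
      ++ List.replicate (l.foldl stepB (out, a, p)).2.1 '*'
      ++ List.replicate (l.foldl stepB (out, a, p)).2.2 '+'
    = out ++ bc l a p := by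
  induction l with
  | nil => intro out a p; simp [bc]
  | cons c t ih =>
    intro out a p
    by_cases hs : c = '*'
    · subst hs
      simp only [List.foldl_cons, stepB, bc, reduceIte]
      exact ih out (a + 1) p
    · by_cases hc : c = '+'
      · subst hc
        simp only [List.foldl_cons, stepB, bc, if_neg hs, reduceIte]
        rw [ih (out ++ List.replicate a '*') 0 (p + 1)]
        simp
      · simp only [List.foldl_cons, stepB, bc, if_neg hs, if_neg hc]
        rw [ih (out ++ [c]) a p]
        simp

theorem answer_alt_eq_bc (s : String) : answer_alt s = String.mk (bc s.toList 0 0) := by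
  unfold answer_alt
  rw [show (([] : List Char), (0 : Nat), (0 : Nat)) = (([] : List Char), (0 : Nat), (0 : Nat)) from rfl]
  have h := foldl_bc s.toList [] 0 0
  simp only [List.nil_append] at h
  simp only [List.append_assoc] at h ⊢
  rw [h]

-- ===== VERDICT (by name: the statement is the Claim_ definition above) =====
theorem answer_spec : Claim_equal_answer := by
  intro s _
  unfold Spec_answer
  rw [answer_eq_bc, answer_alt_eq_bc]
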